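-- pv_equiv track=rewrite | github.com/CompNet/Renard | renard/pipeline/graph_extraction.py | sent_indices_for_block
-- ===== SOURCE A (Python) =====
-- from typing import Dict, Any, List, Set, Optional, Tuple, Literal, Union
--
-- def sent_indices_for_block(
--     dynamic_block: Tuple[int, int], sentences: List[List[str]]
-- ) -> Tuple[int, int]:
--     """Return the indices of the first and the last sentence of a
--     block
--
--     :param dynamic_block: (START, END) in tokens
--     :return: ``(first sentence index, last sentence index)``
--     """
--     block_start, block_end = dynamic_block
--     sents_start = None
--     sents_end = None
--     count = 0
--     for sent_i, sent in enumerate(sentences):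
--         start, end = (count, count + len(sent))
--         count = end
--         if sents_start is None and start >= block_start:
--             sents_start = sent_i
--         if sents_end is None and end >= block_end:
--             # this happens when the block is _smaller_ than the
--             # current sentence. In that case, we return the current
--             # sentence even though it overflows the block.
--             if sents_start is None:
--                 sents_start = sent_i
--             sents_end = sent_i
--             break
--     assert not sents_start is None and not sents_end is None
--     return (sents_start, sents_end)
-- ===== SOURCE B (Python) =====
-- def _bisect_ge(arr, x):
--     """First index lo with arr[lo] >= x (arr nondecreasing), or len(arr)."""
--     lo, hi = 0, len(arr)
--     while lo < hi:
--         mid = (lo + hi) // 2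
--         if arr[mid] >= x:
--             hi = mid
--         else:
--             lo = mid + 1
--     return lo
--
--
-- def sent_indices_for_block(dynamic_block, sentences):
--     block_start, block_end = dynamic_block
--     starts = []
--     ends = []
--     total = 0
--     for sent in sentences:
--         starts.append(total)
--         total += len(sent)
--         ends.append(total)
--     sents_end = _bisect_ge(ends, block_end)
--     assert sents_end < len(ends)
--     sents_start = _bisect_ge(starts, block_start)
--     return (min(sents_start, sents_end), sents_end)
-- ===== Notes on version B (the rewrite author's own statement) =====
-- stated objective: alternative
-- what changed: Replaces the single stateful scan carrying is-None flags with two prefix-offset arrays (starts/ends) built once, then two hand-written binary searches (bisect_left-style) locate the first sentence whose end >= block_end and the first whose start >= block_start, clamped with min.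
import Mathlib
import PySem

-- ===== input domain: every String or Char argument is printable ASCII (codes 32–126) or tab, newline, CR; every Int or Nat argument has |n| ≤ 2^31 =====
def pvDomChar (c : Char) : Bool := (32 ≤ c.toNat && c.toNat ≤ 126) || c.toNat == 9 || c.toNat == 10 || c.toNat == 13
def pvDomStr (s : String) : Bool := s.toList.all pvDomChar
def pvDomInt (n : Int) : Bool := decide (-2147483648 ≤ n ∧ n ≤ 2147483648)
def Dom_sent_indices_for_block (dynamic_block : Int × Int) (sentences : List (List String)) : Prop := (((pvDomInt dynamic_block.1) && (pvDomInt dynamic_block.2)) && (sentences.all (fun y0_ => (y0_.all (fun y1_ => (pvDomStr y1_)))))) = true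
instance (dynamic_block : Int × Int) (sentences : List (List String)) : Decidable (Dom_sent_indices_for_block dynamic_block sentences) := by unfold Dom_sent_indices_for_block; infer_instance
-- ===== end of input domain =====

-- B replaces A's single stateful scan (carrying is-None flags) by prefix-offset
-- arrays plus two binary searches; objective: alternative structure, same cost.

-- ===== PORT A =====
-- the for-loop of A, state = (sent_i, count, sents_start); returns (sents_start, sents_end)
def pvALoop (bs be : Int) : List (List String) → Nat → Int → Option Nat → Option Nat × Option Nat
  | [], _, _, ss => (ss, none)
  | sent :: rest, i, count, ss =>
    let endv := count + (sent.length : Int)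
    let ss' := if ss = none ∧ bs ≤ count then some i else ss
    if be ≤ endv then
      ((if ss' = none then some i else ss'), some i)
    else pvALoop bs be rest (i + 1) endv ss'

def sent_indices_for_block (dynamic_block : Int × Int) (sentences : List (List String)) : Int × Int :=
  match pvALoop dynamic_block.1 dynamic_block.2 sentences 0 0 none with
  | (some a, some b) => ((a : Int), (b : Int))
  | _ => (0, 0)  -- here Python's assert raises; excluded by Pre_

-- ===== PORT B =====
-- Source B's array-building loop: returns (starts, ends) for accumulator `total`
def pvBuildArrays : List (List String) → Int → List Int × List Int
  | [], _ => ([], [])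
  | s :: rest, total =>
    let t' := total + (s.length : Int)
    let pr := pvBuildArrays rest t'
    (total :: pr.1, t' :: pr.2)

-- Source B's _bisect_ge while-loop; the extra fuel argument (any value ≥ hi - lo,
-- the callers pass the array length) only makes the recursion structural
def pvBisectGe (arr : List Int) (x : Int) : Nat → Nat → Nat → Nat
  | 0, lo, _ => lo
  | fuel + 1, lo, hi =>
    if lo < hi then
      let mid := (lo + hi) / 2
      if x ≤ arr.getD mid 0 then pvBisectGe arr x fuel lo mid
      else pvBisectGe arr x fuel (mid + 1) hi
    else lo

def sent_indices_for_block_alt (dynamic_block : Int × Int) (sentences : List (List String)) : Int × Int :=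
  let pr := pvBuildArrays sentences 0
  let e := pvBisectGe pr.2 dynamic_block.2 pr.2.length 0 pr.2.length
  if e < pr.2.length then
    let s := pvBisectGe pr.1 dynamic_block.1 pr.1.length 0 pr.1.length
    ((min s e : Nat), (e : Nat))
  else (0, 0)  -- here Python's assert raises; excluded by Pre_

-- ===== PRECONDITION & SPEC =====
-- Pre_ excludes exactly the inputs where A's assert fails (AssertionError): empty
-- sentence list, or block_end exceeding the total token count.
def Pre_sent_indices_for_block (dynamic_block : Int × Int) (sentences : List (List String)) : Prop :=
  sentences ≠ [] ∧ dynamic_block.2 ≤ (sentences.map (fun s => (s.length : Int))).sum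
instance (dynamic_block : Int × Int) (sentences : List (List String)) : Decidable (Pre_sent_indices_for_block dynamic_block sentences) := by unfold Pre_sent_indices_for_block; infer_instance

def pvWitness_sent_indices_for_block : (Int × Int) × List (List String) := ((0, 1), [["a"]])

def Spec_sent_indices_for_block (dynamic_block : Int × Int) (sentences : List (List String)) (out : Int × Int) : Prop := out = sent_indices_for_block_alt dynamic_block sentences
instance (dynamic_block : Int × Int) (sentences : List (List String)) (out : Int × Int) : Decidable (Spec_sent_indices_for_block dynamic_block sentences out) := by unfold Spec_sent_indices_for_block; infer_instance

-- ===== CLAIM (what is proved, stated in full; the proofs are below) =====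
def Claim_equal_sent_indices_for_block : Prop := ∀ (dynamic_block : Int × Int) (sentences : List (List String)), Dom_sent_indices_for_block dynamic_block sentences → Pre_sent_indices_for_block dynamic_block sentences → Spec_sent_indices_for_block dynamic_block sentences (sent_indices_for_block dynamic_block sentences)

-- ===== LEMMAS AND PROOFS =====

-- linear reference: index of the first element ≥ x
def pvFirstGe (x : Int) : List Int → Option Nat
  | [] => none
  | v :: rest => if x ≤ v then some 0 else (pvFirstGe x rest).map (· + 1)

-- A's loop, started with sents_start already set, only searches for the end index
lemma aLoop_some (bs be : Int) (sents : List (List String)) (i a : Nat) (c : Int) :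
    pvALoop bs be sents i c (some a)
      = (some a, (pvFirstGe be (pvBuildArrays sents c).2).map (· + i)) := by
  induction sents generalizing i c with
  | nil => simp [pvALoop, pvBuildArrays, pvFirstGe]
  | cons s rest ih =>
    simp only [pvALoop, pvBuildArrays, pvFirstGe]
    by_cases h : be ≤ c + (s.length : Int)
    · simp [h]
    · simp only [h, if_false, reduceCtorEq, false_and, ih]
      cases hfe : pvFirstGe be (pvBuildArrays rest (c + (s.length : Int))).2 with
      | none => simp
      | some e =>
        simp only [Option.map_some]
        congr 2
        omega

-- full characterisation of A's loop via the prefix arrays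
lemma aLoop_none (bs be : Int) (sents : List (List String)) (i : Nat) (c : Int) :
    pvALoop bs be sents i c none
      = match pvFirstGe be (pvBuildArrays sents c).2, pvFirstGe bs (pvBuildArrays sents c).1 with
        | none, s? => (s?.map (· + i), none)
        | some e, none => (some (e + i), some (e + i))
        | some e, some s => (some (min s e + i), some (e + i)) := by
  induction sents generalizing i c with
  | nil => simp [pvALoop, pvBuildArrays, pvFirstGe]
  | cons s rest ih =>
    simp only [pvALoop, pvBuildArrays, pvFirstGe]
    by_cases hb : bs ≤ c
    · by_cases he : be ≤ c + (s.length : Int)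
      · simp [hb, he]
      · simp only [hb, he, and_true, if_true, if_false, aLoop_some]
        cases hfe : pvFirstGe be (pvBuildArrays rest (c + (s.length : Int))).2 with
        | none => simp
        | some e =>
          simp only [Option.map_some]
          simp
          omega
    · by_cases he : be ≤ c + (s.length : Int)
      · simp only [hb, he, and_false, if_false, if_true]
        cases hfs : pvFirstGe bs (pvBuildArrays rest (c + (s.length : Int))).1 with
        | none => simp
        | some s' =>
          simp
      · simp only [hb, he, and_false, if_false, ih]
        cases hfe : pvFirstGe be (pvBuildArrays rest (c + (s.length : Int))).2 with
        | none =>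
          cases hfs : pvFirstGe bs (pvBuildArrays rest (c + (s.length : Int))).1 with
          | none => simp
          | some s' => simp; omega
        | some e =>
          cases hfs : pvFirstGe bs (pvBuildArrays rest (c + (s.length : Int))).1 with
          | none => simp; omega
          | some s' =>
            simp
            omega

lemma build_lengths (sents : List (List String)) (c : Int) :
    (pvBuildArrays sents c).1.length = sents.length ∧ (pvBuildArrays sents c).2.length = sents.length := by
  induction sents generalizing c with
  | nil => simp [pvBuildArrays]
  | cons s rest ih => simpa [pvBuildArrays] using ih (c + (s.length : Int))

lemma build_sorted (sents : List (List String)) (c : Int) :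
    ((∀ v ∈ (pvBuildArrays sents c).1, c ≤ v) ∧ (pvBuildArrays sents c).1.Pairwise (· ≤ ·))
    ∧ ((∀ v ∈ (pvBuildArrays sents c).2, c ≤ v) ∧ (pvBuildArrays sents c).2.Pairwise (· ≤ ·)) := by
  induction sents generalizing c with
  | nil => simp [pvBuildArrays]
  | cons s rest ih =>
    obtain ⟨⟨ih1, ih2⟩, ih3, ih4⟩ := ih (c + (s.length : Int))
    simp only [pvBuildArrays, List.pairwise_cons, List.forall_mem_cons]
    refine ⟨⟨⟨le_refl c, fun v hv => ?_⟩, fun v hv => ?_, ih2⟩, ⟨by omega, fun v hv => ?_⟩, ih3, ih4⟩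
    · have := ih1 v hv; omega
    · have := ih1 v hv; omega
    · have := ih3 v hv; omega

lemma sorted_getD_mono (arr : List Int) (hs : arr.Pairwise (· ≤ ·)) :
    ∀ i j, i ≤ j → j < arr.length → arr.getD i 0 ≤ arr.getD j 0 := by
  intro i j hij hj
  have hi : i < arr.length := lt_of_le_of_lt (by omega) hj
  rw [List.getD_eq_getElem arr 0 hi, List.getD_eq_getElem arr 0 hj]
  rcases Nat.eq_or_lt_of_le hij with h | h
  · subst h; rfl
  · exact List.pairwise_iff_getElem.mp hs i j hi hj h

lemma firstGe_none_iff (x : Int) (arr : List Int) :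
    pvFirstGe x arr = none ↔ ∀ v ∈ arr, v < x := by
  induction arr with
  | nil => simp [pvFirstGe]
  | cons v rest ih =>
    simp only [pvFirstGe, List.mem_cons]
    by_cases h : x ≤ v
    · simp only [h, if_true]
      constructor
      · intro hc; exact absurd hc (by simp)
      · intro hall; exact absurd (hall v (Or.inl rfl)) (not_lt.mpr h)
    · simp only [h, if_false, Option.map_eq_none_iff, ih]
      constructor
      · intro H w hw
        rcases hw with rfl | hw
        · exact lt_of_not_ge h
        · exact H w hw
      · intro H w hw; exact H w (Or.inr hw)

lemma firstGe_some (x : Int) (arr : List Int) (k : Nat) (h : pvFirstGe x arr = some k) :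
    k < arr.length ∧ x ≤ arr.getD k 0 ∧ ∀ i < k, arr.getD i 0 < x := by
  induction arr generalizing k with
  | nil => simp [pvFirstGe] at h
  | cons v rest ih =>
    simp only [pvFirstGe] at h
    by_cases hx : x ≤ v
    · simp only [hx, if_true, Option.some.injEq] at h
      subst h
      exact ⟨by simp, by simpa using hx, by omega⟩
    · simp only [hx, if_false, Option.map_eq_some_iff] at h
      obtain ⟨k', hk', rfl⟩ := h
      obtain ⟨h1, h2, h3⟩ := ih k' hk'
      refine ⟨by simpa using h1, by simpa using h2, ?_⟩
      intro i hi
      cases i with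
      | zero => simpa using lt_of_not_ge hx
      | succ j => simpa using h3 j (by omega)

lemma firstGe_of_bounds (x : Int) (arr : List Int) (r : Nat) (hr : r ≤ arr.length)
    (h1 : ∀ i < r, arr.getD i 0 < x) (h2 : r < arr.length → x ≤ arr.getD r 0) :
    (pvFirstGe x arr).getD arr.length = r := by
  induction arr generalizing r with
  | nil =>
    simp only [List.length_nil] at hr
    simp [pvFirstGe]
    omega
  | cons v rest ih =>
    simp only [pvFirstGe]
    by_cases hx : x ≤ v
    · simp only [hx, if_true, Option.getD_some]
      by_contra hne
      have hr0 : 0 < r := Nat.pos_of_ne_zero (fun h => hne h.symm)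
      have := h1 0 hr0
      simp at this
      omega
    · have hr0 : r ≠ 0 := by
        intro h; subst h
        exact hx (h2 (by simp))
      simp only [hx, if_false]
      have hrec := ih (r - 1) (by simp at hr; omega)
        (fun i hi => by simpa using h1 (i + 1) (by omega))
        (fun hlt => by
          have h2' := h2 (by simp; omega)
          have hreq : r = (r - 1) + 1 := by omega
          rw [hreq] at h2'
          simpa using h2')
      cases hfe : pvFirstGe x rest with
      | none => simp [hfe] at hrec ⊢; omega
      | some k => simp [hfe] at hrec ⊢; omega

lemma bisect_inv (arr : List Int) (x : Int)
    (mono : ∀ i j, i ≤ j → j < arr.length → arr.getD i 0 ≤ arr.getD j 0) :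
    ∀ n lo hi, hi - lo ≤ n → lo ≤ hi → hi ≤ arr.length →
      (∀ i < lo, arr.getD i 0 < x) → (∀ i, hi ≤ i → i < arr.length → x ≤ arr.getD i 0) →
      pvBisectGe arr x n lo hi = (pvFirstGe x arr).getD arr.length := by
  intro n
  induction n with
  | zero =>
    intro lo hi hn hlh hhl h1 h2
    have heq : lo = hi := by omega
    subst heq
    simp only [pvBisectGe]
    exact (firstGe_of_bounds x arr lo hhl h1 (fun hlt => h2 lo (le_refl _) hlt)).symm
  | succ n ih =>
    intro lo hi hn hlh hhl h1 h2
    simp only [pvBisectGe]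
    by_cases hlt : lo < hi
    · rw [if_pos hlt]
      by_cases hx : x ≤ arr.getD ((lo + hi) / 2) 0
      · rw [if_pos hx]
        exact ih lo ((lo + hi) / 2) (by omega) (by omega) (by omega) h1
          (fun i hmi hil => le_trans hx (mono _ i hmi hil))
      · rw [if_neg hx]
        refine ih ((lo + hi) / 2 + 1) hi (by omega) (by omega) hhl ?_ h2
        intro i hi2
        have hmlen : (lo + hi) / 2 < arr.length := by omega
        exact lt_of_le_of_lt (mono i ((lo + hi) / 2) (by omega) hmlen) (lt_of_not_ge hx)
    · rw [if_neg hlt]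
      have heq : lo = hi := by omega
      subst heq
      exact (firstGe_of_bounds x arr lo hhl h1 (fun hlt => h2 lo (le_refl _) hlt)).symm

lemma bisect_eq_firstGe (arr : List Int) (x : Int) (hs : arr.Pairwise (· ≤ ·)) :
    pvBisectGe arr x arr.length 0 arr.length = (pvFirstGe x arr).getD arr.length := by
  exact bisect_inv arr x (sorted_getD_mono arr hs) arr.length 0 arr.length (by omega)
    (by omega) (le_refl _) (by omega) (by omega)

lemma build_sum_mem (sents : List (List String)) (c : Int) (h : sents ≠ []) :
    (c + (sents.map (fun s => (s.length : Int))).sum) ∈ (pvBuildArrays sents c).2 := by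
  induction sents generalizing c with
  | nil => exact absurd rfl h
  | cons s rest ih =>
    simp only [pvBuildArrays, List.map_cons, List.sum_cons, List.mem_cons]
    by_cases hr : rest = []
    · subst hr; left; simp
    · right
      have heq : c + ((s.length : Int) + (rest.map (fun t => (t.length : Int))).sum)
           = (c + (s.length : Int)) + (rest.map (fun t => (t.length : Int))).sum := by ring
      rw [heq]
      exact ih (c + (s.length : Int)) hr

-- ===== VERDICT (by name: the statement is the Claim_ definition above) =====
theorem sent_indices_for_block_spec : Claim_equal_sent_indices_for_block := by
  unfold Claim_equal_sent_indices_for_block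
  intro db sents hdom hpre
  obtain ⟨hne, hsum⟩ := hpre
  unfold Spec_sent_indices_for_block sent_indices_for_block sent_indices_for_block_alt
  obtain ⟨⟨hstb, hsts⟩, henb, hens⟩ := build_sorted sents 0
  obtain ⟨hlen1, hlen2⟩ := build_lengths sents 0
  rw [aLoop_none]
  simp only [bisect_eq_firstGe (pvBuildArrays sents 0).2 db.2 hens,
    bisect_eq_firstGe (pvBuildArrays sents 0).1 db.1 hsts]
  have hmem := build_sum_mem sents 0 hne
  have hex : pvFirstGe db.2 (pvBuildArrays sents 0).2 ≠ none := by
    intro hnone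
    have := (firstGe_none_iff _ _).mp hnone _ hmem
    omega
  cases hfe : pvFirstGe db.2 (pvBuildArrays sents 0).2 with
  | none => exact absurd hfe hex
  | some e =>
    obtain ⟨helen, -, -⟩ := firstGe_some _ _ _ hfe
    cases hfs : pvFirstGe db.1 (pvBuildArrays sents 0).1 with
    | none =>
      have hmin : min (pvBuildArrays sents 0).1.length e = e := by omega
      simp [helen, hmin]
    | some s =>
      simp [helen]
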